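-- pv_equiv track=rewrite | github.com/MotorFish/motor-report-skill | scripts/build_comparison.py | candidateStatus
-- ===== SOURCE A (Python) =====
-- def candidateStatus(unitOk, checks):
--     if not unitOk:
--         return "unit_mismatch"
--     statuses = {check["status"] for check in checks}
--     if "unit_mismatch" in statuses:
--         return "unit_mismatch"
--     if "condition_mismatch" in statuses:
--         return "condition_mismatch"
--     if "needs_review" in statuses or not checks:
--         return "needs_review"
--     return "comparable"
-- ===== SOURCE B (Python) =====
-- # B: min-reduction over a priority rank instead of building a set and probing it in order.
-- _RANK = {"unit_mismatch": 0, "condition_mismatch": 1, "needs_review": 2}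
-- _NAME = ["unit_mismatch", "condition_mismatch", "needs_review", "comparable"]
--
-- def candidateStatus(unitOk, checks):
--     if not unitOk:
--         return "unit_mismatch"
--     if not checks:
--         return "needs_review"
--     best = min(_RANK.get(c["status"], 3) for c in checks)
--     return _NAME[best]
-- ===== Notes on version B (the rewrite author's own statement) =====
-- stated objective: alternative
-- what changed: Replaces the set-comprehension plus ordered membership probes by a single min-reduction over a priority rank followed by one rank-to-name mapping.
import Mathlib
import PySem

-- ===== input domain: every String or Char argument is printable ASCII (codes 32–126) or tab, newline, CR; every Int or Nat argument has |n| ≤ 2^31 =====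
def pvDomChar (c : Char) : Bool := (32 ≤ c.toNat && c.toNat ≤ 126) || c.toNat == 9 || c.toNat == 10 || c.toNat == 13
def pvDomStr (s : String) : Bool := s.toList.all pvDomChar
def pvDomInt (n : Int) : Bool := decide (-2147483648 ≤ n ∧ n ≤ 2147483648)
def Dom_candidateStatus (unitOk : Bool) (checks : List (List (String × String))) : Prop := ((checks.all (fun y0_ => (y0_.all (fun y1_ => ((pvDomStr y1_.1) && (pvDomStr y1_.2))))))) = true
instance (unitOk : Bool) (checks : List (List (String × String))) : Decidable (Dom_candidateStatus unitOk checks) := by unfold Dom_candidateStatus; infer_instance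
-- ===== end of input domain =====

-- B replaces A's set-build plus ordered membership probes by one min-reduction over a
-- priority rank and a single rank-to-name mapping (alternative decomposition, same cost).

-- ===== PORT A =====
-- check["status"]: dict lookup, KeyError when absent; getD "" is exact under Pre_ (key present)
def pvStatusOf (c : List (String × String)) : String :=
  PySem.Dict.getD (PySem.Dict.mk c) "status" ""

def candidateStatus (unitOk : Bool) (checks : List (List (String × String))) : String :=
  if !unitOk then "unit_mismatch"
  else
    let statuses : PySem.Set String := PySem.Set.ofList (checks.map pvStatusOf)
    if PySem.Set.contains statuses "unit_mismatch" then "unit_mismatch"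
    else if PySem.Set.contains statuses "condition_mismatch" then "condition_mismatch"
    else if PySem.Set.contains statuses "needs_review" || checks.isEmpty then "needs_review"
    else "comparable"

-- ===== PORT B =====
-- _RANK.get(s, 3)
def pvRank (s : String) : Int :=
  if s = "unit_mismatch" then 0
  else if s = "condition_mismatch" then 1
  else if s = "needs_review" then 2
  else 3

def candidateStatus_alt (unitOk : Bool) (checks : List (List (String × String))) : String :=
  if !unitOk then "unit_mismatch"
  else if checks.isEmpty then "needs_review"
  else
    -- min over the nonempty generator of ranks
    let best :=
      match checks.map (fun c => pvRank (pvStatusOf c)) with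
      | [] => 3
      | r :: rs => rs.foldl min r
    -- _NAME[best]
    if best = 0 then "unit_mismatch"
    else if best = 1 then "condition_mismatch"
    else if best = 2 then "needs_review"
    else "comparable"

-- ===== PRECONDITION & SPEC =====
-- Pre_ excludes exactly the inputs where A raises KeyError: unitOk truthy and some check lacks a "status" key.
def Pre_candidateStatus (unitOk : Bool) (checks : List (List (String × String))) : Prop :=
  unitOk = false ∨ (checks.all (fun c => c.any (fun p => p.1 == "status"))) = true
instance (unitOk : Bool) (checks : List (List (String × String))) : Decidable (Pre_candidateStatus unitOk checks) := by unfold Pre_candidateStatus; infer_instance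

def pvWitness_candidateStatus : Bool × (List (List (String × String))) :=
  (true, [[("status", "comparable")], [("status", "needs_review")]])

def Spec_candidateStatus (unitOk : Bool) (checks : List (List (String × String))) (out : String) : Prop := out = candidateStatus_alt unitOk checks
instance (unitOk : Bool) (checks : List (List (String × String))) (out : String) : Decidable (Spec_candidateStatus unitOk checks out) := by unfold Spec_candidateStatus; infer_instance

-- ===== CLAIM (what is proved, stated in full; the proofs are below) =====
def Claim_equal_candidateStatus : Prop := ∀ (unitOk : Bool) (checks : List (List (String × String))), Dom_candidateStatus unitOk checks → Pre_candidateStatus unitOk checks → Spec_candidateStatus unitOk checks (candidateStatus unitOk checks)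

-- ===== LEMMAS AND PROOFS =====

lemma pvRank_nonneg (s : String) : 0 ≤ pvRank s := by
  unfold pvRank; split_ifs <;> norm_num

lemma pvRank_eq_zero_iff (s : String) : pvRank s = 0 ↔ s = "unit_mismatch" := by
  unfold pvRank; split_ifs with h1 h2 h3 <;> simp_all

lemma pvRank_eq_one_iff (s : String) : pvRank s = 1 ↔ s = "condition_mismatch" := by
  unfold pvRank; split_ifs with h1 h2 h3 <;> simp_all

lemma pvRank_eq_two_iff (s : String) : pvRank s = 2 ↔ s = "needs_review" := by
  unfold pvRank; split_ifs with h1 h2 h3 <;> simp_all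

lemma foldl_min_mem (rs : List Int) : ∀ r : Int, rs.foldl min r ∈ r :: rs := by
  induction rs with
  | nil => intro r; simp
  | cons a rs ih =>
    intro r
    rw [List.foldl_cons]
    rcases List.mem_cons.mp (ih (min r a)) with h' | h'
    · rw [h']
      rcases min_choice r a with hm | hm <;> rw [hm] <;> simp
    · exact List.mem_cons_of_mem _ (List.mem_cons_of_mem _ h')

lemma foldl_min_le (rs : List Int) : ∀ (r x : Int), x ∈ r :: rs → rs.foldl min r ≤ x := by
  induction rs with
  | nil => intro r x hx; simp at hx; simp [hx]
  | cons a rs ih =>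
    intro r x hx
    rw [List.foldl_cons]
    have hbase := ih (min r a) (min r a) List.mem_cons_self
    rcases List.mem_cons.mp hx with h' | h'
    · rw [h']; exact le_trans hbase (min_le_left _ _)
    · rcases List.mem_cons.mp h' with h'' | h''
      · rw [h'']; exact le_trans hbase (min_le_right _ _)
      · exact ih (min r a) x (List.mem_cons_of_mem _ h'')

-- the fold's value is the rank of some status in the list, and a lower bound of all of them
lemma best_spec (c : List (String × String)) (cs : List (List (String × String))) :
    (∃ d ∈ c :: cs, ((cs.map (fun c => pvRank (pvStatusOf c))).foldl min (pvRank (pvStatusOf c))) = pvRank (pvStatusOf d))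
    ∧ ∀ d ∈ c :: cs, ((cs.map (fun c => pvRank (pvStatusOf c))).foldl min (pvRank (pvStatusOf c))) ≤ pvRank (pvStatusOf d) := by
  constructor
  · have h := foldl_min_mem (cs.map (fun c => pvRank (pvStatusOf c))) (pvRank (pvStatusOf c))
    rcases List.mem_cons.mp h with h' | h'
    · exact ⟨c, by simp, h'⟩
    · rcases List.mem_map.mp h' with ⟨d, hd, hr⟩
      exact ⟨d, List.mem_cons_of_mem _ hd, hr.symm⟩
  · intro d hd
    apply foldl_min_le
    rcases List.mem_cons.mp hd with h' | h'
    · simp [h']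
    · exact List.mem_cons_of_mem _ (List.mem_map.mpr ⟨d, h', rfl⟩)

-- membership of a status string in A's set ↔ some check maps to it
lemma contains_statuses (c : List (String × String)) (cs : List (List (String × String))) (s : String) :
    PySem.Set.contains (PySem.Set.ofList (pvStatusOf c :: cs.map pvStatusOf)) s = true
      ↔ ∃ d ∈ c :: cs, pvStatusOf d = s := by
  rw [PySem.Set.contains_iff, PySem.Set.mem_ofList]
  constructor
  · intro h
    rcases List.mem_cons.mp h with h' | h'
    · exact ⟨c, List.mem_cons_self, h'.symm⟩
    · rcases List.mem_map.mp h' with ⟨d, hd, hr⟩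
      exact ⟨d, List.mem_cons_of_mem _ hd, hr⟩
  · rintro ⟨d, hd, rfl⟩
    rcases List.mem_cons.mp hd with h' | h'
    · subst h'; exact List.mem_cons_self
    · exact List.mem_cons_of_mem _ (List.mem_map.mpr ⟨d, h', rfl⟩)

-- ===== VERDICT (by name: the statement is the Claim_ definition above) =====
theorem candidateStatus_spec : Claim_equal_candidateStatus := by
  intro unitOk checks _ _
  unfold Spec_candidateStatus candidateStatus candidateStatus_alt
  cases unitOk with
  | false => simp
  | true =>
    simp only [Bool.not_true, if_neg (by simp : ¬ (false = true))]
    cases checks with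
    | nil => simp [PySem.Set.ofList, PySem.Set.contains]
    | cons c cs =>
      simp only [List.isEmpty_cons, if_neg (by simp : ¬ (false = true))]
      simp only [List.map_cons]
      obtain ⟨⟨d₀, hd₀, hbest⟩, hle⟩ := best_spec c cs
      set best := (cs.map (fun c => pvRank (pvStatusOf c))).foldl min (pvRank (pvStatusOf c)) with hbdef
      by_cases h0 : ∃ d ∈ c :: cs, pvStatusOf d = "unit_mismatch"
      · obtain ⟨d, hd, hds⟩ := h0
        have h1 : best ≤ 0 := by
          have := hle d hd; rwa [hds, (pvRank_eq_zero_iff _).mpr rfl] at this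
        have h2 : 0 ≤ best := hbest ▸ pvRank_nonneg _
        have hb : best = 0 := le_antisymm h1 h2
        rw [hbdef] at hb
        rw [if_pos ((contains_statuses c cs _).mpr ⟨d, hd, hds⟩)]
        simp [hb]
      · have hb0 : best ≠ 0 := by
          intro h; exact h0 ⟨d₀, hd₀, (pvRank_eq_zero_iff _).mp (h ▸ hbest.symm)⟩
        have hge1 : 1 ≤ best := by
          have := hbest ▸ pvRank_nonneg (pvStatusOf d₀); omega
        rw [if_neg (by rw [contains_statuses c cs]; exact h0)]
        by_cases h1 : ∃ d ∈ c :: cs, pvStatusOf d = "condition_mismatch"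
        · obtain ⟨d, hd, hds⟩ := h1
          have hle1 : best ≤ 1 := by
            have := hle d hd; rwa [hds, (pvRank_eq_one_iff _).mpr rfl] at this
          have hb : best = 1 := le_antisymm hle1 hge1
          rw [hbdef] at hb
          rw [if_pos ((contains_statuses c cs _).mpr ⟨d, hd, hds⟩)]
          simp [hb]
        · have hb1 : best ≠ 1 := by
            intro h; exact h1 ⟨d₀, hd₀, (pvRank_eq_one_iff _).mp (h ▸ hbest.symm)⟩
          have hge2 : 2 ≤ best := by omega
          rw [if_neg (by rw [contains_statuses c cs]; exact h1)]
          by_cases h2 : ∃ d ∈ c :: cs, pvStatusOf d = "needs_review"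
          · obtain ⟨d, hd, hds⟩ := h2
            have hle2 : best ≤ 2 := by
              have := hle d hd; rwa [hds, (pvRank_eq_two_iff _).mpr rfl] at this
            have hb : best = 2 := le_antisymm hle2 hge2
            rw [hbdef] at hb
            rw [if_pos (by
              rw [Bool.or_eq_true]; left
              exact (contains_statuses c cs _).mpr ⟨d, hd, hds⟩)]
            simp [hb]
          · have hb2 : best ≠ 2 := by
              intro h; exact h2 ⟨d₀, hd₀, (pvRank_eq_two_iff _).mp (h ▸ hbest.symm)⟩
            rw [if_neg (by
              rw [Bool.or_eq_true]
              push Not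
              refine ⟨fun h => h2 ((contains_statuses c cs _).mp h), by simp⟩)]
            rw [hbdef] at hb0 hb1 hb2
            simp [hb0, hb1, hb2]
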